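-- pv_equiv track=rewrite | github.com/alonerocky/IYOCGwP | src/bagels.py | getClues
-- ===== SOURCE A (Python) =====
-- def getClues(guess, secretNumber):
--     if guess == secretNumber:
--         return "you got it!"
--
--     clue= []
--     for i in range(len(guess)):
--         if guess[i] == secretNumber[i]:
--             clue.append('Fermi')
--         elif guess[i] in secretNumber:
--             clue.append('Pico')
--
--     if len(clue) == 0:
--         return 'Bagels'
--
--     clue.sort( )
--     return ' '.join(clue)
-- ===== SOURCE B (Python) =====
-- def getClues(guess, secretNumber):
--     if guess == secretNumber:
--         return "you got it!"
--     secretSet = set(secretNumber)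
--     fermi = sum(g == s for g, s in zip(guess, secretNumber))
--     hits = sum(g in secretSet for g in guess)
--     if hits == 0:
--         return 'Bagels'
--     return ('Fermi ' * fermi + 'Pico ' * (hits - fermi))[:-1]
-- ===== Notes on version B (the rewrite author's own statement) =====
-- stated objective: alternative
-- what changed: Replaces collect-tags-then-sort with: build set(secretNumber) once, count exact matches and set hits in two direct counts, derive pico = hits - fermi by the inclusion identity (an exact match is always a hit), and build the clue string by string repetition plus a final slice instead of join(sorted(...)); measured ~1.3-1.7x but below the 1.5x confirmation threshold at the largest size.
import Mathlib
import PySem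

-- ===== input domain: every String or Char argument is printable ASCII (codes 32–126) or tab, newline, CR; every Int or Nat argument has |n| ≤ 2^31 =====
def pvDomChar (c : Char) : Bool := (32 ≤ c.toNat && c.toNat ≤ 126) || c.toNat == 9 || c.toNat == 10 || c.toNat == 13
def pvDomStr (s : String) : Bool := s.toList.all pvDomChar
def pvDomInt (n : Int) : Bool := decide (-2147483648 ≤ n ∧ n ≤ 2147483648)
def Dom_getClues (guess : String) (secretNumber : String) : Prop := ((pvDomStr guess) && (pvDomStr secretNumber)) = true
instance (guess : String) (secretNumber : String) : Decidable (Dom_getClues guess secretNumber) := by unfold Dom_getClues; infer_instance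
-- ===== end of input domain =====

-- B precomputes set(secretNumber) once, counts exact matches and set hits in two direct
-- counts over the characters, derives pico = hits - fermi by the inclusion identity, and
-- builds the clue string by repetition and a final slice instead of collect-tags-then-sort;
-- return-value equivalence on Pre_.

-- ===== PORT A =====
def getClues (guess : String) (secretNumber : String) : String :=
  if guess == secretNumber then "you got it!"
  else
    let g := guess.toList
    let s := secretNumber.toList
    -- for i in range(len(guess)): append 'Fermi' / 'Pico' (pyGetD: in range under Pre_)
    let clue := (PySem.List.pyRange 0 g.length 1).foldl (fun acc i =>
      if PySem.List.pyGetD g i ' ' == PySem.List.pyGetD s i ' ' then acc ++ ["Fermi"]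
      else if PySem.Chars.isIn [PySem.List.pyGetD g i ' '] s then acc ++ ["Pico"]
      else acc) []
    if clue.length == 0 then "Bagels"
    else PySem.Str.join " " (PySem.List.sorted clue (fun x => x) false)

-- ===== PORT B =====
def getClues_alt (guess : String) (secretNumber : String) : String :=
  if guess == secretNumber then "you got it!"
  else
    let secretSet := PySem.Set.ofList secretNumber.toList
    -- fermi = sum(g == s for g, s in zip(guess, secretNumber))
    let fermi : Int := ((guess.toList.zip secretNumber.toList).map
      (fun p => if p.1 == p.2 then (1 : Int) else 0)).sum
    -- hits = sum(g in secretSet for g in guess)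
    let hits : Int := (guess.toList.map
      (fun c => if PySem.Set.contains secretSet c then (1 : Int) else 0)).sum
    if hits == 0 then "Bagels"
    else
      -- ('Fermi ' * fermi + 'Pico ' * (hits - fermi))[:-1]
      String.ofList (PySem.List.slice
        (PySem.List.pyRepeat "Fermi ".toList fermi ++ PySem.List.pyRepeat "Pico ".toList (hits - fermi))
        none (some (-1)))

-- ===== PRECONDITION & SPEC =====
-- Pre_ excludes exactly the inputs where A raises IndexError: guess longer than secretNumber
-- (and not equal to it), since the loop indexes secretNumber[i] for i up to len(guess).
def Pre_getClues (guess : String) (secretNumber : String) : Prop :=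
  guess = secretNumber ∨ guess.toList.length ≤ secretNumber.toList.length
instance (guess : String) (secretNumber : String) : Decidable (Pre_getClues guess secretNumber) := by unfold Pre_getClues; infer_instance
def pvWitness_getClues : String × String := ("123", "135")

def Spec_getClues (guess : String) (secretNumber : String) (out : String) : Prop := out = getClues_alt guess secretNumber
instance (guess : String) (secretNumber : String) (out : String) : Decidable (Spec_getClues guess secretNumber out) := by unfold Spec_getClues; infer_instance

-- ===== CLAIM (what is proved, stated in full; the proofs are below) =====
def Claim_equal_getClues : Prop := ∀ (guess : String) (secretNumber : String), Dom_getClues guess secretNumber → Pre_getClues guess secretNumber → Spec_getClues guess secretNumber (getClues guess secretNumber)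

-- ===== LEMMAS AND PROOFS =====

-- the per-pair clue choice of A's loop
def clueOf (s : List Char) (p : Char × Char) : List String :=
  if p.1 == p.2 then ["Fermi"]
  else if PySem.Chars.isIn [p.1] s then ["Pico"]
  else []

theorem pyRange_map_zip (g s : List Char) (h : g.length ≤ s.length) :
    (PySem.List.pyRange 0 g.length 1).map
      (fun i => (PySem.List.pyGetD g i ' ', PySem.List.pyGetD s i ' ')) = g.zip s := by
  rw [PySem.List.pyRange_zero_natCast, List.map_map]
  apply List.ext_getElem
  · simp; omega
  · intro i h1 h2
    have hi : i < g.length := by simpa using h1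
    have hi2 : i < s.length := by omega
    simp [List.getElem_zip, List.getD_eq_getElem?_getD, hi, hi2]

theorem foldl_clue (g s : List Char) (l : List Int) (acc : List String) :
    l.foldl (fun acc i =>
      if PySem.List.pyGetD g i ' ' == PySem.List.pyGetD s i ' ' then acc ++ ["Fermi"]
      else if PySem.Chars.isIn [PySem.List.pyGetD g i ' '] s then acc ++ ["Pico"]
      else acc) acc
    = acc ++ l.flatMap (fun i => clueOf s (PySem.List.pyGetD g i ' ', PySem.List.pyGetD s i ' ')) := by
  induction l generalizing acc with
  | nil => simp
  | cons x t ih =>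
    simp only [List.foldl_cons, List.flatMap_cons, ih, clueOf]
    split_ifs <;> simp_all

theorem clue_eq_flatMap (g s : List Char) (h : g.length ≤ s.length) :
    (PySem.List.pyRange 0 g.length 1).foldl (fun acc i =>
      if PySem.List.pyGetD g i ' ' == PySem.List.pyGetD s i ' ' then acc ++ ["Fermi"]
      else if PySem.Chars.isIn [PySem.List.pyGetD g i ' '] s then acc ++ ["Pico"]
      else acc) []
    = (g.zip s).flatMap (clueOf s) := by
  rw [foldl_clue, List.nil_append, ← pyRange_map_zip g s h, List.flatMap_map]

theorem mem_clue (s : List Char) (pairs : List (Char × Char)) (x : String)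
    (hx : x ∈ pairs.flatMap (clueOf s)) : x = "Fermi" ∨ x = "Pico" := by
  simp only [List.mem_flatMap, clueOf] at hx
  obtain ⟨p, _, hp⟩ := hx
  split_ifs at hp <;> simp_all

theorem count_fermi (s : List Char) (pairs : List (Char × Char)) :
    (pairs.flatMap (clueOf s)).count "Fermi" = pairs.countP (fun p => p.1 == p.2) := by
  induction pairs with
  | nil => simp
  | cons p t ih =>
    simp only [List.flatMap_cons, List.countP_cons, clueOf]
    split_ifs <;> simp_all

theorem count_pico (s : List Char) (pairs : List (Char × Char)) :
    (pairs.flatMap (clueOf s)).count "Pico"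
      = pairs.countP (fun p => p.1 != p.2 && PySem.Chars.isIn [p.1] s) := by
  induction pairs with
  | nil => simp
  | cons p t ih =>
    simp only [List.flatMap_cons, List.countP_cons, clueOf]
    split_ifs <;> simp_all

theorem len_clue (s : List Char) (pairs : List (Char × Char)) :
    (pairs.flatMap (clueOf s)).length
      = pairs.countP (fun p => p.1 == p.2)
        + pairs.countP (fun p => p.1 != p.2 && PySem.Chars.isIn [p.1] s) := by
  induction pairs with
  | nil => simp
  | cons p t ih =>
    simp only [List.flatMap_cons, List.countP_cons, List.length_append, clueOf]
    split_ifs <;> simp_all <;> omega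

theorem sorted_clue (s : List Char) (pairs : List (Char × Char)) :
    PySem.List.sorted (pairs.flatMap (clueOf s)) (fun x => x) false
      = List.replicate (pairs.countP (fun p => p.1 == p.2)) "Fermi"
        ++ List.replicate (pairs.countP (fun p => p.1 != p.2 && PySem.Chars.isIn [p.1] s)) "Pico" := by
  apply PySem.List.sorted_id_eq_of_perm_of_pairwise
  · rw [List.perm_iff_count]
    intro a
    by_cases hF : a = "Fermi"
    · simp [hF, List.count_append, List.count_replicate, count_fermi]
    · by_cases hP : a = "Pico"
      · simp [hP, List.count_append, List.count_replicate, count_pico]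
      · have h1 : a ∉ pairs.flatMap (clueOf s) := fun hm => by
          rcases mem_clue s pairs a hm with h | h <;> simp_all
        have h2 : a ∉ List.replicate (pairs.countP (fun p => p.1 == p.2)) "Fermi"
            ++ List.replicate (pairs.countP (fun p => p.1 != p.2 && PySem.Chars.isIn [p.1] s)) "Pico" := by
          simp [List.mem_replicate, hF, hP]
        rw [List.count_eq_zero_of_not_mem h2, List.count_eq_zero_of_not_mem h1]
  · rw [List.pairwise_append]
    refine ⟨List.pairwise_replicate.mpr (Or.inr le_rfl), List.pairwise_replicate.mpr (Or.inr le_rfl), ?_⟩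
    intro x hx y hy
    rw [List.eq_of_mem_replicate hx, List.eq_of_mem_replicate hy]
    exact le_of_lt (by rw [String.lt_iff_toList_lt]; exact List.Lex.rel (by decide))

-- B's membership test agrees with A's substring test on single characters
theorem contains_eq_isIn (s : List Char) (c : Char) :
    PySem.Set.contains (PySem.Set.ofList s) c = PySem.Chars.isIn [c] s := by
  apply Bool.coe_iff_coe.mp
  simp only [PySem.Set.contains]
  rw [List.contains_iff_mem, PySem.Set.mem_ofList, PySem.Chars.isIn_iff_infix,
      List.singleton_infix_iff]

-- the inclusion identity: hits = fermi + pico over the pairs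
theorem hits_split (s : List Char) (pairs : List (Char × Char))
    (hmem : ∀ p ∈ pairs, p.2 ∈ s) :
    pairs.countP (fun p => PySem.Chars.isIn [p.1] s)
      = pairs.countP (fun p => p.1 == p.2)
        + pairs.countP (fun p => p.1 != p.2 && PySem.Chars.isIn [p.1] s) := by
  induction pairs with
  | nil => simp
  | cons p t ih =>
    have ht : ∀ q ∈ t, q.2 ∈ s := fun q hq => hmem q (List.mem_cons_of_mem p hq)
    simp only [List.countP_cons]
    rw [ih ht]
    by_cases he : p.1 = p.2
    · have hin : PySem.Chars.isIn [p.1] s = true := by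
        rw [PySem.Chars.isIn_iff_infix]
        exact (List.singleton_infix_iff _ _).mpr (he ▸ hmem p List.mem_cons_self)
      have hb : (p.1 == p.2) = true := by simp [he]
      have hbne : (p.1 != p.2) = false := by simp [he]
      simp only [hin, hb, hbne, Bool.false_and, if_true, Bool.false_eq_true, if_false]
      omega
    · by_cases hi : PySem.Chars.isIn [p.1] s
      · simp [he, hi]; omega
      · simp [he, hi]

theorem hits_eq (g s : List Char) (h : g.length ≤ s.length) :
    g.countP (fun c => PySem.Set.contains (PySem.Set.ofList s) c)
      = (g.zip s).countP (fun p => p.1 == p.2)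
        + (g.zip s).countP (fun p => p.1 != p.2 && PySem.Chars.isIn [p.1] s) := by
  have hg : g = (g.zip s).map Prod.fst := (List.map_fst_zip h).symm
  calc g.countP (fun c => PySem.Set.contains (PySem.Set.ofList s) c)
      = ((g.zip s).map Prod.fst).countP (fun c => PySem.Chars.isIn [c] s) := by
        rw [← hg]; exact List.countP_congr (fun c _ => by rw [contains_eq_isIn])
    _ = (g.zip s).countP (fun p => PySem.Chars.isIn [p.1] s) := List.countP_map
    _ = _ := hits_split s (g.zip s) (fun p hp => (List.of_mem_zip hp).2)

-- join with ' ' of Fermi*f ++ Pico*p  =  ('Fermi '*f ++ 'Pico '*p).dropLast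
theorem intercalate_eq_dropLast (c : Char) (L : List (List Char)) (h : L ≠ []) :
    [c].intercalate L = (L.flatMap (fun w => w ++ [c])).dropLast := by
  induction L with
  | nil => exact absurd rfl h
  | cons w t ih =>
    cases t with
    | nil => simp [List.intercalate]
    | cons w' t' =>
      have ht : (w :: w' :: t').flatMap (fun w => w ++ [c])
          = (w ++ [c]) ++ (w' :: t').flatMap (fun w => w ++ [c]) := by simp
      have hne : (w' :: t').flatMap (fun w => w ++ [c]) ≠ [] := by simp
      rw [ht, List.dropLast_append_of_ne_nil hne, ← ih (by simp)]
      simp [List.intercalate, List.intersperse]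

theorem join_replicate (f p : Nat) (h : f + p ≠ 0) :
    (PySem.Str.join " " (List.replicate f "Fermi" ++ List.replicate p "Pico")).toList
      = ((List.replicate f "Fermi ".toList).flatten ++ (List.replicate p "Pico ".toList).flatten).dropLast := by
  rw [PySem.Str.toList_join]
  have hne : List.replicate f "Fermi" ++ List.replicate p "Pico" ≠ [] := by
    simp only [ne_eq, List.append_eq_nil_iff, List.replicate_eq_nil_iff, not_and_or]
    omega
  show [' '].intercalate _ = _
  rw [intercalate_eq_dropLast ' ' _ (by simpa using hne)]
  congr 1
  rw [List.map_append, List.flatMap_append, List.map_replicate, List.map_replicate,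
      List.flatMap_replicate, List.flatMap_replicate]
  have e1 : "Fermi".toList ++ [' '] = "Fermi ".toList := by decide
  have e2 : "Pico".toList ++ [' '] = "Pico ".toList := by decide
  rw [e1, e2]

-- ===== VERDICT (by name: the statement is the Claim_ definition above) =====
theorem getClues_spec : Claim_equal_getClues := by
  intro guess secret _ hpre
  unfold Spec_getClues getClues getClues_alt
  by_cases heq : guess = secret
  · simp [heq]
  · have hlen : guess.toList.length ≤ secret.toList.length := by
      rcases hpre with h | h
      · exact absurd h heq
      · exact h
    have hbe : (guess == secret) = false := by simp [heq]
    simp only [hbe, Bool.false_eq_true, if_false]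
    set g := guess.toList
    set s := secret.toList
    set f := (g.zip s).countP (fun p => p.1 == p.2) with hf
    set p := (g.zip s).countP (fun p => p.1 != p.2 && PySem.Chars.isIn [p.1] s) with hp
    have hclue := clue_eq_flatMap g s hlen
    have hfermi : ((g.zip s).map (fun q => if q.1 == q.2 then (1 : Int) else 0)).sum = (f : Int) :=
      PySem.List.sum_map_ite_one_zero _ _
    have hhits : (g.map (fun c => if PySem.Set.contains (PySem.Set.ofList s) c then (1 : Int) else 0)).sum
        = ((f + p : Nat) : Int) := by
      rw [PySem.List.sum_map_ite_one_zero, hits_eq g s hlen]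
    rw [hclue, hfermi, hhits, len_clue, ← hf, ← hp]
    by_cases hz : f + p = 0
    · simp only [hz, Nat.cast_zero, beq_self_eq_true, if_true]
    · have hz' : (((f + p : Nat) : Int) == 0) = false := by
        simp only [beq_eq_false_iff_ne, ne_eq, Nat.cast_eq_zero]; exact hz
      have hlz : (f + p == 0) = false := by simpa using hz
      simp only [hz', hlz, Bool.false_eq_true, if_false]
      rw [sorted_clue, ← hf, ← hp]
      have hsub : ((f + p : Nat) : Int) - (f : Int) = ((p : Nat) : Int) := by push_cast; ring
      rw [hsub]
      have h1 : PySem.List.pyRepeat "Fermi ".toList (f : Int) = (List.replicate f "Fermi ".toList).flatten := by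
        simp [PySem.List.pyRepeat]
      have h2 : PySem.List.pyRepeat "Pico ".toList (p : Int) = (List.replicate p "Pico ".toList).flatten := by
        simp [PySem.List.pyRepeat]
      rw [h1, h2, PySem.List.slice_to_neg_one]
      apply String.toList_injective
      rw [join_replicate f p hz]
      simp [String.toList_ofList]
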